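-- pv_equiv track=rewrite | github.com/pypi-data/pypi-mirror-235 | packages/nodeps/nodeps-0.1.23-py3-none-any.whl/nodeps/__init__.py | _extras
-- ===== SOURCE A (Python) =====
-- def _extras(d):
--     e = {}
--     for item in d:
--         if "; extra" in item:
--             key = item.split("; extra == ")[1].replace("'", "").replace('"', "").removesuffix(" ")
--             if key not in e:
--                 e[key] = []
--             e[key].append(item.split("; extra == ")[0].replace('"', "").removesuffix(" "))
--     return e
-- ===== SOURCE B (Python) =====
-- def _extras(d):
--     pairs = [
--         (p[1].replace("'", "").replace('"', "").removesuffix(" "),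
--          p[0].replace('"', "").removesuffix(" "))
--         for p in (item.split("; extra == ") for item in d if "; extra" in item)
--     ]
--     return {k: [v for q, v in pairs if q == k]
--             for k in dict.fromkeys(k for k, _ in pairs)}
-- ===== Notes on version B (the rewrite author's own statement) =====
-- stated objective: idiomatic
-- what changed: B replaces A's incremental dict-building loop (membership test, conditional empty-list insert, append per item) by a declarative two-phase pipeline: one comprehension parsing the qualifying items into (key, value) pairs, then a grouping comprehension over the first-occurrence-deduplicated keys (dict.fromkeys), filtering the pair list per key.
import Mathlib
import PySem

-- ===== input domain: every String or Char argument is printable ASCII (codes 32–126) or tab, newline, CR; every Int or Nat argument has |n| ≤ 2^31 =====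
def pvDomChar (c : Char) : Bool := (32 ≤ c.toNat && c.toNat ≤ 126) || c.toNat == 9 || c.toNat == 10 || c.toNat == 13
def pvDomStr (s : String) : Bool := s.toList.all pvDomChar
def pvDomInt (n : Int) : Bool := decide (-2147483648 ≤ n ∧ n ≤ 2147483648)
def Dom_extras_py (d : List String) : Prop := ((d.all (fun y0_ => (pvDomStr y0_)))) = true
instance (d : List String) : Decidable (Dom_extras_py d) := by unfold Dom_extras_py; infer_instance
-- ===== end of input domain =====

-- B replaces A's incremental dict-building loop by a parse pass (filter+map into (key, value)
-- pairs) followed by grouping over the first-occurrence-deduplicated keys (objective: idiomatic).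

-- str.removesuffix(suf): exact for non-empty suf (here only used with " ")
def pvRemoveSuffix (s suf : String) : String :=
  if suf ≠ "" ∧ PySem.Str.endswith s suf then
    String.ofList (s.toList.take (s.toList.length - suf.toList.length))
  else s

-- the parsing both Pythons share verbatim:
-- key   = item.split("; extra == ")[1].replace("'", "").replace('"', "").removesuffix(" ")
-- value = item.split("; extra == ")[0].replace('"', "").removesuffix(" ")
-- (split?/pyGet? return none exactly where Python raises; Pre_ excludes the pyGet? 1 = none case)
def pvParse (item : String) : String × String :=
  let parts := (PySem.Str.split? item "; extra == ").getD []
  (pvRemoveSuffix (PySem.Str.replace (PySem.Str.replace ((PySem.List.pyGet? parts 1).getD "") "'" "") "\"" "") " ",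
   pvRemoveSuffix (PySem.Str.replace ((PySem.List.pyGet? parts 0).getD "") "\"" "") " ")

-- ===== PORT A =====
-- the loop body: if key not in e: e[key] = []; e[key].append(value)
def pvStepA (e : PySem.Dict String (List String)) (p : String × String) :
    PySem.Dict String (List String) :=
  let e1 := if e.contains p.1 then e else e.insert p.1 ([] : List String)
  e1.modify p.1 [] (fun vs => vs ++ [p.2])

def extras_py (d : List String) : List (String × List String) :=
  (d.foldl
    (fun e item => if PySem.Str.isIn "; extra" item then pvStepA e (pvParse item) else e)
    PySem.Dict.empty).items

-- ===== PORT B =====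
def extras_py_alt (d : List String) : List (String × List String) :=
  let pairs := (d.filter (fun item => PySem.Str.isIn "; extra" item)).map pvParse
  (PySem.List.dedup (pairs.map Prod.fst)).map
    (fun k => (k, (pairs.filter (fun q => q.1 == k)).map Prod.snd))

-- ===== PRECONDITION & SPEC =====
-- Pre_ excludes exactly the inputs on which Python A raises IndexError: an item containing
-- "; extra" but not the full separator "; extra == " makes item.split("; extra == ")[1] raise.
def Pre_extras_py (d : List String) : Prop :=
  ∀ item ∈ d, PySem.Str.isIn "; extra" item = true → PySem.Str.isIn "; extra == " item = true
instance (d : List String) : Decidable (Pre_extras_py d) := by unfold Pre_extras_py; infer_instance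

def pvWitness_extras_py : List String :=
  ["requests <3 ; extra == 'dev'", "pytest; extra == \"test\" ", "six"]

def Spec_extras_py (d : List String) (out : List (String × List String)) : Prop := out = extras_py_alt d
instance (d : List String) (out : List (String × List String)) : Decidable (Spec_extras_py d out) := by unfold Spec_extras_py; infer_instance

-- ===== CLAIM (what is proved, stated in full; the proofs are below) =====
def Claim_equal_extras_py : Prop := ∀ (d : List String), Dom_extras_py d → Pre_extras_py d → Spec_extras_py d (extras_py d)

-- ===== LEMMAS AND PROOFS =====

-- the values grouped under key j by the pair list ps
def pvVals (ps : List (String × String)) (j : String) : List String :=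
  (ps.filter (fun q => q.1 == j)).map Prod.snd

theorem pvVals_cons (k v j : String) (tl : List (String × String)) :
    pvVals ((k, v) :: tl) j = if k = j then v :: pvVals tl j else pvVals tl j := by
  simp [pvVals, List.filter_cons]
  split_ifs with h <;> simp_all

theorem pvDedup_cons (k : String) (xs : List String) :
    PySem.List.dedup (k :: xs) = k :: (PySem.List.dedup xs).filter (fun j => !(j == k)) := by
  have h : PySem.List.dedup (k :: xs) = PySem.Set.update (PySem.Set.add PySem.Set.empty k) xs := by
    simp [PySem.List.dedup, PySem.Set.ofList, PySem.Set.update, List.foldl]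
  rw [h, PySem.Set.update_eq_append_filter]
  simp [PySem.Set.add, PySem.Set.empty, PySem.Set.contains, PySem.List.dedup]
  exact List.filter_congr (fun a _ => by by_cases hak : a = k <;> simp [hak])

-- A's fold over d is the same fold over the parsed qualifying pairs
theorem pvFoldl_filter_map (d : List String) (e : PySem.Dict String (List String)) :
    d.foldl (fun e item => if PySem.Str.isIn "; extra" item then pvStepA e (pvParse item) else e) e
      = ((d.filter (fun item => PySem.Str.isIn "; extra" item)).map pvParse).foldl pvStepA e := by
  induction d generalizing e with
  | nil => rfl
  | cons x xs ih =>
      simp only [List.foldl_cons, List.filter_cons]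
      split <;> simp_all

-- the dict-building loop, characterised: existing entries get their new values appended,
-- fresh keys are appended in first-occurrence order
theorem pvFoldl_stepA (ps : List (String × String)) :
    ∀ (e : PySem.Dict String (List String)), e.keys.Nodup →
      (ps.foldl pvStepA e).items =
        e.items.map (fun kv => (kv.1, kv.2 ++ pvVals ps kv.1)) ++
        ((PySem.List.dedup (ps.map Prod.fst)).filter (fun j => !e.contains j)).map
          (fun j => (j, pvVals ps j)) := by
  induction ps with
  | nil =>
      intro e _
      simp [pvVals, PySem.List.dedup, PySem.Set.ofList]
  | cons p tl ih =>
      intro e he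
      obtain ⟨k, v⟩ := p
      simp only [List.foldl_cons]
      by_cases hc : e.contains k = true
      · -- key already present: the k-entry's list gets v appended
        have hstep : pvStepA e (k, v) = e.insert k (e.getD k [] ++ [v]) := by
          simp [pvStepA, hc, PySem.Dict.modify]
        have he' : (pvStepA e (k, v)).keys.Nodup := by
          rw [hstep]; exact PySem.Dict.nodup_keys_insert _ _ _ he
        rw [ih _ he']
        have hitems : (pvStepA e (k, v)).items
            = e.items.map (fun q => if q.1 = k then (k, q.2 ++ [v]) else q) := by
          rw [hstep, PySem.Dict.items_insert_of_contains _ _ hc]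
          refine List.map_congr_left (fun q hq => ?_)
          by_cases hqk : q.1 = k
          · obtain ⟨q1, q2⟩ := q
            simp only at hqk
            subst hqk
            have := PySem.Dict.get?_of_mem_items e hq he
            simp [PySem.Dict.getD_eq_get?_getD, this]
          · simp [hqk]
        have hcont : ∀ j, (pvStepA e (k, v)).contains j = ((j == k) || e.contains j) := by
          intro j; rw [hstep]; exact PySem.Dict.contains_insert _ _ _ _
        congr 1
        · rw [hitems, List.map_map]
          refine List.map_congr_left (fun q hq => ?_)
          by_cases hqk : q.1 = k
          · simp [hqk, pvVals_cons]
          · have hkq : ¬ k = q.1 := fun h => hqk h.symm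
            simp [hqk, hkq, pvVals_cons, Function.comp]
        · simp only [List.map_cons]
          rw [pvDedup_cons]
          simp only [List.filter_cons]
          have hk : (!e.contains k) = false := by simp [hc]
          rw [List.filter_filter]
          simp only [hk, if_false, Bool.false_eq_true]
          refine Eq.symm ?_
          have hpred : ∀ j ∈ PySem.List.dedup (tl.map Prod.fst),
              (!e.contains j && !(j == k)) = (!(pvStepA e (k, v)).contains j) := by
            intro j _
            rw [hcont j]
            by_cases hjk : j = k <;> simp [hjk, hc, Bool.and_comm]
          rw [List.filter_congr hpred]
          refine List.map_congr_left (fun j hj => ?_)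
          have hjk : j ≠ k := by
            have := List.of_mem_filter hj
            rw [hcont j] at this
            intro heq; subst heq; simp [hc] at this
          simp [pvVals_cons, Ne.symm hjk]
      · -- fresh key: (k, [v]) is appended
        have hc' : e.contains k = false := by simpa using hc
        have hgd : (e.insert k ([] : List String)).getD k [] = ([] : List String) := by
          rw [PySem.Dict.getD_eq_get?_getD, PySem.Dict.get?_insert_self]; rfl
        have hstep : pvStepA e (k, v) = (e.insert k []).insert k [v] := by
          simp [pvStepA, hc', PySem.Dict.modify, hgd]
        have he' : (pvStepA e (k, v)).keys.Nodup := by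
          rw [hstep]
          exact PySem.Dict.nodup_keys_insert _ _ _ (PySem.Dict.nodup_keys_insert _ _ _ he)
        rw [ih _ he']
        have hnotmem : ∀ q ∈ e.items, (q.1 == k) = false := by
          intro q hq
          by_contra hne
          rw [Bool.not_eq_false] at hne
          have hck : e.contains k = true := by
            simp only [PySem.Dict.contains, List.any_eq_true]
            exact ⟨q, hq, hne⟩
          rw [hck] at hc'
          exact absurd hc' (by simp)
        have hitems : (pvStepA e (k, v)).items = e.items ++ [(k, [v])] := by
          rw [hstep]
          have h1 : (e.insert k ([] : List String)).items = e.items ++ [(k, ([] : List String))] :=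
            PySem.Dict.items_insert_of_not_contains _ _ hc'
          have h2 : (e.insert k ([] : List String)).contains k = true := by
            simp

          rw [PySem.Dict.items_insert_of_contains _ _ h2, h1]
          rw [List.map_append]
          congr 1
          · refine (List.map_congr_left (fun q hq => ?_)).trans (List.map_id _)
            simp [hnotmem q hq]
          · simp
        have hcont : ∀ j, (pvStepA e (k, v)).contains j = ((j == k) || e.contains j) := by
          intro j
          rw [hstep, PySem.Dict.contains_insert, PySem.Dict.contains_insert]
          by_cases hjk : j = k <;> simp [hjk]
        rw [hitems]
        rw [List.map_append, List.append_assoc]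
        congr 1
        · refine List.map_congr_left (fun q hq => ?_)
          have : q.1 ≠ k := by simpa using hnotmem q hq
          simp [pvVals_cons, Ne.symm this]
        · simp only [List.map_cons]
          rw [pvDedup_cons]
          simp only [List.filter_cons]
          have hk : (!e.contains k) = true := by simp [hc']
          rw [List.filter_filter]
          simp only [hk, if_true]
          have hpred : ∀ j ∈ PySem.List.dedup (tl.map Prod.fst),
              (!e.contains j && !(j == k)) = (!(pvStepA e (k, v)).contains j) := by
            intro j _
            rw [hcont j]
            by_cases hjk : j = k <;> simp [hjk, Bool.and_comm]
          rw [List.filter_congr hpred]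
          simp only [List.map_cons, List.map_nil, List.cons_append, List.nil_append]
          congr 1
          · simp [pvVals_cons]
          · refine Eq.symm ?_
            refine List.map_congr_left (fun j hj => ?_)
            have hjk : j ≠ k := by
              have := List.of_mem_filter hj
              rw [hcont j] at this
              intro hq; subst hq; simp at this
            simp [pvVals_cons, Ne.symm hjk]

-- ===== VERDICT (by name: the statement is the Claim_ definition above) =====
theorem extras_py_spec : Claim_equal_extras_py := by
  intro d _ _
  show extras_py d = extras_py_alt d
  unfold extras_py extras_py_alt
  rw [pvFoldl_filter_map, pvFoldl_stepA _ _ (by simp [PySem.Dict.keys, PySem.Dict.empty])]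
  simp [PySem.Dict.empty, pvVals]
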